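-- pv_equiv track=rewrite | github.com/DevilDantes/TeoriaCompilador | AFN-E.py | formato_bonito
-- ===== SOURCE A (Python) =====
-- def formato_bonito(texto):
--     superscripts = {"0":"⁰", "1":"¹", "2":"²", "3":"³", "4":"⁴", "5":"⁵", "6":"⁶", "7":"⁷", "8":"⁸", "9":"⁹"}
--     # Limpiamos texto y cambiamos la palabra sqrt por el símbolo
--     texto_str = str(texto).replace(" ", "").replace("sqrt", "√")
--
--     nuevo_texto = ""
--     i = 0
--     while i < len(texto_str):
--         # Convertir potencias a superíndices reales
--         if texto_str[i:i+2] == "**":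
--             i += 2
--             while i < len(texto_str) and texto_str[i].isdigit():
--                 nuevo_texto += superscripts.get(texto_str[i], texto_str[i])
--                 i += 1
--             continue
--         # Eliminar asteriscos de multiplicación
--         elif texto_str[i] == "*":
--             i += 1
--             continue
--         else:
--             nuevo_texto += texto_str[i]
--             i += 1
--
--     # Dar un formato espaciado y limpio a sumas y restas
--     nuevo_texto = nuevo_texto.replace("+", " + ").replace("-", " - ")
--     # Evitar espacio inicial extraño si el primer número es negativo
--     if nuevo_texto.startswith(" - "):
--         nuevo_texto = "-" + nuevo_texto[3:]
--
--     return nuevo_texto.strip()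
-- ===== SOURCE B (Python) =====
-- def formato_bonito(texto):
--     superscripts = {"0":"⁰", "1":"¹", "2":"²", "3":"³", "4":"⁴", "5":"⁵", "6":"⁶", "7":"⁷", "8":"⁸", "9":"⁹"}
--     s = str(texto).replace(" ", "").replace("sqrt", "√")
--     # One pass with a 3-state machine: 0 = normal, 1 = one '*' pending, 2 = superscript mode
--     out = []
--     state = 0
--     for c in s:
--         if c == "*":
--             state = 2 if state == 1 else 1
--         elif state == 2 and c.isdigit():
--             out.append(superscripts.get(c, c))
--         else:
--             out.append(c)
--             state = 0
--     r = "".join(out).replace("+", " + ").replace("-", " - ")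
--     if r.startswith(" - "):
--         r = "-" + r[3:]
--     return r.strip()
-- ===== Notes on version B (the rewrite author's own statement) =====
-- stated objective: faster
-- what changed: A's index-based while loop with a nested digit-consuming inner loop and repeated string concatenation is replaced by a single left-to-right pass driven by an explicit 3-state machine (normal / pending star / superscript mode) appending pieces to a list joined once; the cleanup and spacing replaces are unchanged.
import Mathlib
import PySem

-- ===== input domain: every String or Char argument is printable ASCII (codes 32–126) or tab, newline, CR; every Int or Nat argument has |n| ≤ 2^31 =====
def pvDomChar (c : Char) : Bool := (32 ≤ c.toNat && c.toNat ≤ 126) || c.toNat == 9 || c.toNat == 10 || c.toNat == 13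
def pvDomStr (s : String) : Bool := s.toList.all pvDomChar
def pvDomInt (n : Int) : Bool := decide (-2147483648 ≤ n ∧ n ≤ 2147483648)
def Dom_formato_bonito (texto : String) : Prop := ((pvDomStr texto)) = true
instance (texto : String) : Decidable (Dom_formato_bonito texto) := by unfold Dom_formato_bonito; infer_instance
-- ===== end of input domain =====

-- B replaces A's index-based double while loop (with quadratic string concatenation) by a single fold with an explicit 3-state machine, joining collected pieces once (measured faster in a timing run).

-- shared helper: the superscripts dict and the lookup superscripts.get(c, c) (both Pythons define it identically)
def pvSuperscripts : PySem.Dict String String :=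
  PySem.Dict.ofList [("0","⁰"), ("1","¹"), ("2","²"), ("3","³"), ("4","⁴"),
                     ("5","⁵"), ("6","⁶"), ("7","⁷"), ("8","⁸"), ("9","⁹")]

def pvSup (c : Char) : List Char :=
  (PySem.Dict.getD pvSuperscripts (String.singleton c) (String.singleton c)).toList

-- ===== PORT A =====
-- inner while loop of A: consume digits after "**", mapping them through superscripts.get
def pvSupDigits : List Char → List Char × List Char
  | [] => ([], [])
  | c :: rest =>
    if PySem.Chars.isdigit c then
      let p := pvSupDigits rest
      (pvSup c ++ p.1, p.2)
    else ([], c :: rest)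

theorem pvSupDigits_snd_le : ∀ cs : List Char, (pvSupDigits cs).2.length ≤ cs.length
  | [] => by simp [pvSupDigits]
  | c :: rest => by
    simp only [pvSupDigits]
    split
    · exact Nat.le_succ_of_le (pvSupDigits_snd_le rest)
    · simp

-- outer while loop of A (texto_str[i:i+2] == "**" ⇔ the next two chars are both '*')
def pvLoopA : List Char → List Char
  | [] => []
  | [c] => if c = '*' then [] else [c]
  | c1 :: c2 :: rest =>
    if c1 = '*' then
      if c2 = '*' then
        let p := pvSupDigits rest
        p.1 ++ pvLoopA p.2
      else pvLoopA (c2 :: rest)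
    else c1 :: pvLoopA (c2 :: rest)
termination_by cs => cs.length
decreasing_by
  · simpa using Nat.lt_succ_of_le (Nat.le_succ_of_le (pvSupDigits_snd_le rest))
  · simp
  · simp

def formato_bonito (texto : String) : String :=
  let texto_str := PySem.Str.replace (PySem.Str.replace texto " " "") "sqrt" "√"
  let nuevo := String.ofList (pvLoopA texto_str.toList)
  let nuevo2 := PySem.Str.replace (PySem.Str.replace nuevo "+" " + ") "-" " - "
  let nuevo3 :=
    if PySem.Str.startswith nuevo2 " - " then
      "-" ++ String.ofList (PySem.List.slice nuevo2.toList (some 3) none)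
    else nuevo2
  PySem.Str.strip nuevo3

-- ===== PORT B =====
-- B's per-character step: state 0 = normal, 1 = one '*' pending, 2 = superscript mode
def pvStepB (acc : Nat × List Char) (c : Char) : Nat × List Char :=
  if c = '*' then (if acc.1 = 1 then 2 else 1, acc.2)
  else if acc.1 = 2 ∧ PySem.Chars.isdigit c then (acc.1, acc.2 ++ pvSup c)
  else (0, acc.2 ++ [c])

def formato_bonito_alt (texto : String) : String :=
  let s := PySem.Str.replace (PySem.Str.replace texto " " "") "sqrt" "√"
  let out := (List.foldl pvStepB (0, []) s.toList).2
  let r := PySem.Str.replace (PySem.Str.replace (String.ofList out) "+" " + ") "-" " - "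
  let r2 :=
    if PySem.Str.startswith r " - " then
      "-" ++ String.ofList (PySem.List.slice r.toList (some 3) none)
    else r
  PySem.Str.strip r2

-- ===== PRECONDITION & SPEC =====
def Spec_formato_bonito (texto : String) (out : String) : Prop := out = formato_bonito_alt texto
instance (texto : String) (out : String) : Decidable (Spec_formato_bonito texto out) := by unfold Spec_formato_bonito; infer_instance

-- ===== CLAIM (what is proved, stated in full; the proofs are below) =====
def Claim_equal_formato_bonito : Prop := ∀ (texto : String), Dom_formato_bonito texto → Spec_formato_bonito texto (formato_bonito texto)

-- ===== LEMMAS AND PROOFS =====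

-- what B's fold computes from each reachable state, phrased with A's loop functions
def pvRun (st : Nat) (cs : List Char) : List Char :=
  if st = 0 then pvLoopA cs
  else if st = 1 then pvLoopA ('*' :: cs)
  else (pvSupDigits cs).1 ++ pvLoopA (pvSupDigits cs).2

theorem pvFoldB_eq : ∀ (cs : List Char) (st : Nat) (out : List Char),
    st = 0 ∨ st = 1 ∨ st = 2 →
    (List.foldl pvStepB (st, out) cs).2 = out ++ pvRun st cs := by
  intro cs
  induction cs with
  | nil =>
    intro st out hst
    rcases hst with h | h | h <;> subst h <;>
      simp [pvRun, pvLoopA, pvSupDigits]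
  | cons c cs ih =>
    intro st out hst
    by_cases hc : c = '*'
    · subst hc
      rcases hst with h | h | h <;> subst h
      · rw [List.foldl_cons, show pvStepB (0, out) '*' = (1, out) by simp [pvStepB],
            ih 1 out (by simp)]
        simp [pvRun]
      · rw [List.foldl_cons, show pvStepB (1, out) '*' = (2, out) by simp [pvStepB],
            ih 2 out (by simp)]
        simp [pvRun, pvLoopA]
      · rw [List.foldl_cons, show pvStepB (2, out) '*' = (1, out) by simp [pvStepB],
            ih 1 out (by simp)]
        have : PySem.Chars.isdigit '*' = false := by decide
        simp [pvRun, pvSupDigits, this]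
    · by_cases hd : PySem.Chars.isdigit c = true
      · rcases hst with h | h | h <;> subst h
        · rw [List.foldl_cons,
              show pvStepB (0, out) c = (0, out ++ [c]) by simp [pvStepB, hc],
              ih 0 (out ++ [c]) (by simp)]
          cases cs with
          | nil => simp [pvRun, pvLoopA, hc]
          | cons d ds => simp [pvRun, pvLoopA, hc]
        · rw [List.foldl_cons,
              show pvStepB (1, out) c = (0, out ++ [c]) by simp [pvStepB, hc],
              ih 0 (out ++ [c]) (by simp)]
          cases cs with
          | nil => simp [pvRun, pvLoopA, hc]
          | cons d ds => simp [pvRun, pvLoopA, hc]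
        · rw [List.foldl_cons,
              show pvStepB (2, out) c = (2, out ++ pvSup c) by simp [pvStepB, hc, hd],
              ih 2 (out ++ pvSup c) (by simp)]
          simp [pvRun, pvSupDigits, hd]
      · rcases hst with h | h | h <;> subst h
        · rw [List.foldl_cons,
              show pvStepB (0, out) c = (0, out ++ [c]) by simp [pvStepB, hc, hd],
              ih 0 (out ++ [c]) (by simp)]
          cases cs with
          | nil => simp [pvRun, pvLoopA, hc]
          | cons d ds => simp [pvRun, pvLoopA, hc]
        · rw [List.foldl_cons,
              show pvStepB (1, out) c = (0, out ++ [c]) by simp [pvStepB, hc, hd],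
              ih 0 (out ++ [c]) (by simp)]
          cases cs with
          | nil => simp [pvRun, pvLoopA, hc]
          | cons d ds => simp [pvRun, pvLoopA, hc]
        · rw [List.foldl_cons,
              show pvStepB (2, out) c = (0, out ++ [c]) by simp [pvStepB, hc, hd],
              ih 0 (out ++ [c]) (by simp)]
          cases cs with
          | nil => simp [pvRun, pvSupDigits, hd, pvLoopA, hc]
          | cons d ds => simp [pvRun, pvSupDigits, hd, pvLoopA, hc]

theorem pvCore_eq (l : List Char) : (List.foldl pvStepB (0, []) l).2 = pvLoopA l := by
  simpa [pvRun] using pvFoldB_eq l 0 [] (by simp)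

-- ===== VERDICT (by name: the statement is the Claim_ definition above) =====
theorem formato_bonito_spec : Claim_equal_formato_bonito := by
  intro texto _
  unfold Spec_formato_bonito formato_bonito formato_bonito_alt
  simp only [pvCore_eq]
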